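-- pv_equiv track=rewrite | github.com/mjc92/CopyNet | packages/functions.py | word_list_to_idx_list
-- ===== SOURCE A (Python) =====
-- def word_list_to_idx_list(word_list, word2idx, vocab_size):
-- 	out = []
-- 	oov2idx = dict()
-- 	oov_words = []
-- 	for word in word_list:
-- 		try:
-- 			out.append(word2idx[word])
-- 		except KeyError:
-- 			if word not in oov2idx:
-- 				oov2idx[word]=vocab_size+len(oov2idx)
-- 			out.append(oov2idx[word])
-- 	return out
-- ===== SOURCE B (Python) =====
-- def word_list_to_idx_list(word_list, word2idx, vocab_size):
--     # Two explicit passes: first collect the OOV vocabulary table, then map.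
--     oov = list(dict.fromkeys(w for w in word_list if w not in word2idx))
--     oov2idx = {w: vocab_size + i for i, w in enumerate(oov)}
--     return [word2idx[w] if w in word2idx else oov2idx[w] for w in word_list]
-- ===== Notes on version B (the rewrite author's own statement) =====
-- stated objective: alternative
-- what changed: Replaces the single stateful loop (dict built while emitting, with try/except) by two separate passes: an ordered dedup of the out-of-vocabulary words builds the whole OOV table first, then a pure map looks each word up in one table or the other.
import Mathlib
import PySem

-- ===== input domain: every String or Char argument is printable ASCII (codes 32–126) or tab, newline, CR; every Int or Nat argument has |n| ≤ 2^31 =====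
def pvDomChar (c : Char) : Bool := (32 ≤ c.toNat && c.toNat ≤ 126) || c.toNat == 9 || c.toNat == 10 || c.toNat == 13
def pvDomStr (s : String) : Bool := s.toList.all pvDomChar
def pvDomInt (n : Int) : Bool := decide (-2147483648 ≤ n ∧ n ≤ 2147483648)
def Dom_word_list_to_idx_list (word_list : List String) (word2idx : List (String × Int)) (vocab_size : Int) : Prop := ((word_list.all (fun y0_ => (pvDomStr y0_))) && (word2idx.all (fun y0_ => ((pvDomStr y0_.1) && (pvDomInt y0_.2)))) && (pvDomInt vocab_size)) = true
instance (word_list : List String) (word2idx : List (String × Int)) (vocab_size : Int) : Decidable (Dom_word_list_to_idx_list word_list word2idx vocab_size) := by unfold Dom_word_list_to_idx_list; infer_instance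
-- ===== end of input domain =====

-- B replaces A's single stateful loop by two passes (ordered dedup of OOV words, then a pure map);
-- a genuinely different decomposition of the same computation ("alternative", not claimed faster).

-- ===== PORT A =====
-- One loop; state = (out, oov2idx). 'word2idx[word]' / KeyError is the first-match
-- lookup (List.lookup) being none; 'oov2idx[word]' after the guard always succeeds,
-- so '.getD 0' is never the default.
def word_list_to_idx_list (word_list : List String) (word2idx : List (String × Int)) (vocab_size : Int) : List Int :=
  (word_list.foldl
    (fun (s : List Int × PySem.Dict String Int) word =>
      match List.lookup word word2idx with
      | some v => (s.1 ++ [v], s.2)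
      | none =>
        let d := if s.2.contains word then s.2 else s.2.insert word (vocab_size + (s.2.size : Int))
        (s.1 ++ [(d.get? word).getD 0], d))
    ([], PySem.Dict.empty)).1

-- ===== PORT B =====
-- B-side helpers: the OOV words of the list (first occurrences, in order) and the
-- enumerate-comprehension building {w: vocab_size + i}.
def pvOov (word2idx : List (String × Int)) (l : List String) : List String :=
  PySem.List.dedup (l.filter (fun w => (List.lookup w word2idx).isNone))

def pvMkTbl (vs : Int) : List String → Nat → List (String × Int)
  | [], _ => []
  | w :: ws, i => (w, vs + (i : Int)) :: pvMkTbl vs ws (i + 1)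

def word_list_to_idx_list_alt (word_list : List String) (word2idx : List (String × Int)) (vocab_size : Int) : List Int :=
  let oov := pvOov word2idx word_list
  let oov2idx := pvMkTbl vocab_size oov 0
  word_list.map (fun w =>
    match List.lookup w word2idx with
    | some v => v
    | none => (List.lookup w oov2idx).getD 0)  -- oov2idx[w]: always present, default unused

-- ===== PRECONDITION & SPEC =====
def Spec_word_list_to_idx_list (word_list : List String) (word2idx : List (String × Int)) (vocab_size : Int) (out : List Int) : Prop := out = word_list_to_idx_list_alt word_list word2idx vocab_size
instance (word_list : List String) (word2idx : List (String × Int)) (vocab_size : Int) (out : List Int) : Decidable (Spec_word_list_to_idx_list word_list word2idx vocab_size out) := by unfold Spec_word_list_to_idx_list; infer_instance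

-- ===== CLAIM (what is proved, stated in full; the proofs are below) =====
def Claim_equal_word_list_to_idx_list : Prop := ∀ (word_list : List String) (word2idx : List (String × Int)) (vocab_size : Int), Dom_word_list_to_idx_list word_list word2idx vocab_size → Spec_word_list_to_idx_list word_list word2idx vocab_size (word_list_to_idx_list word_list word2idx vocab_size)

-- ===== LEMMAS AND PROOFS =====

theorem pv_lookup_append {β : Type} (a : String) (l₁ l₂ : List (String × β)) :
    List.lookup a (l₁ ++ l₂) = (List.lookup a l₁).or (List.lookup a l₂) := by
  induction l₁ with
  | nil => simp
  | cons p t ih =>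
    cases p with
    | mk k v =>
      by_cases h : a == k
      · simp [List.lookup, h]
      · simp only [List.cons_append, List.lookup, h]
        exact ih

theorem pv_mkTbl_append (vs : Int) (a b : List String) (n : Nat) :
    pvMkTbl vs (a ++ b) n = pvMkTbl vs a n ++ pvMkTbl vs b (n + a.length) := by
  induction a generalizing n with
  | nil => simp [pvMkTbl]
  | cons w ws ih =>
    simp only [List.cons_append, pvMkTbl, ih (n + 1), List.length_cons]
    have h : n + 1 + ws.length = n + (ws.length + 1) := by omega
    rw [h]

theorem pv_lookup_mkTbl_isSome (vs : Int) (a : List String) (n : Nat) (w : String) :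
    (List.lookup w (pvMkTbl vs a n)).isSome = true ↔ w ∈ a := by
  induction a generalizing n with
  | nil => simp [pvMkTbl]
  | cons x xs ih =>
    by_cases h : w = x
    · subst h; simp [pvMkTbl]
    · have hb : (w == x) = false := by simp [h]
      simp [pvMkTbl, List.lookup, hb, ih (n + 1), h]

-- oov of p ++ r extends oov of p on the right
theorem pv_oov_prefix (w2i : List (String × Int)) (p r : List String) :
    ∃ t, pvOov w2i (p ++ r) = pvOov w2i p ++ t := by
  simp only [pvOov, List.filter_append, PySem.List.dedup_eq_ofList, PySem.Set.ofList_append,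
    PySem.Set.update_eq_append_filter]
  exact ⟨_, rfl⟩

-- the three snoc cases for oov
theorem pv_oov_snoc_vocab (w2i : List (String × Int)) (p : List String) (w : String)
    (h : ¬ (List.lookup w w2i).isNone = true) :
    pvOov w2i (p ++ [w]) = pvOov w2i p := by
  simp [pvOov, List.filter_append, h]

theorem pv_oov_snoc_old (w2i : List (String × Int)) (p : List String) (w : String)
    (h : (List.lookup w w2i).isNone = true) (hm : w ∈ pvOov w2i p) :
    pvOov w2i (p ++ [w]) = pvOov w2i p := by
  have hf : List.filter (fun w => (List.lookup w w2i).isNone) [w] = [w] := by simp [h]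
  simp only [pvOov, List.filter_append, hf, PySem.List.dedup_eq_ofList] at hm ⊢
  rw [PySem.Set.ofList_append_singleton, PySem.Set.add_of_mem hm]

theorem pv_oov_snoc_new (w2i : List (String × Int)) (p : List String) (w : String)
    (h : (List.lookup w w2i).isNone = true) (hm : w ∉ pvOov w2i p) :
    pvOov w2i (p ++ [w]) = pvOov w2i p ++ [w] := by
  have hf : List.filter (fun w => (List.lookup w w2i).isNone) [w] = [w] := by simp [h]
  simp only [pvOov, List.filter_append, hf, PySem.List.dedup_eq_ofList] at hm ⊢
  rw [PySem.Set.ofList_append_singleton, PySem.Set.add_of_not_mem hm]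

-- B's per-word mapping, with an explicit table
def pvB (w2i tbl : List (String × Int)) (w : String) : Int :=
  match List.lookup w w2i with
  | some v => v
  | none => (List.lookup w tbl).getD 0

theorem pv_alt_eq (wl : List String) (w2i : List (String × Int)) (vs : Int) :
    word_list_to_idx_list_alt wl w2i vs = wl.map (pvB w2i (pvMkTbl vs (pvOov w2i wl) 0)) := rfl

-- a lookup that hits the left table ignores the extension
theorem pv_lookup_tbl_prefix (w2i : List (String × Int)) (vs : Int) (p r : List String)
    (w : String) (hm : w ∈ pvOov w2i p) :
    List.lookup w (pvMkTbl vs (pvOov w2i (p ++ r)) 0) = List.lookup w (pvMkTbl vs (pvOov w2i p) 0) := by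
  obtain ⟨t, ht⟩ := pv_oov_prefix w2i p r
  rw [ht, pv_mkTbl_append, pv_lookup_append]
  have hs : (List.lookup w (pvMkTbl vs (pvOov w2i p) 0)).isSome = true :=
    (pv_lookup_mkTbl_isSome vs _ 0 w).mpr hm
  cases hg : List.lookup w (pvMkTbl vs (pvOov w2i p) 0) with
  | none => rw [hg] at hs; simp at hs
  | some v => simp [Option.or]

-- MAIN INVARIANT: running A's loop over `rest` from a dict that agrees with B's table
-- for the processed prefix `p` produces B's mapping over `rest` under the full table.
theorem pv_main (w2i : List (String × Int)) (vs : Int) :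
    ∀ (rest p : List String) (out0 : List Int) (d : PySem.Dict String Int),
    d.size = (pvOov w2i p).length →
    (∀ w, d.get? w = List.lookup w (pvMkTbl vs (pvOov w2i p) 0)) →
    (rest.foldl
      (fun (s : List Int × PySem.Dict String Int) word =>
        match List.lookup word w2i with
        | some v => (s.1 ++ [v], s.2)
        | none =>
          let d := if s.2.contains word then s.2 else s.2.insert word (vs + (s.2.size : Int))
          (s.1 ++ [(d.get? word).getD 0], d))
      (out0, d)).1
    = out0 ++ rest.map (pvB w2i (pvMkTbl vs (pvOov w2i (p ++ rest)) 0)) := by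
  intro rest
  induction rest with
  | nil => intro p out0 d _ _; simp
  | cons w rest' ih =>
    intro p out0 d hsize hget
    have hassoc : p ++ w :: rest' = (p ++ [w]) ++ rest' := by simp
    cases hlk : List.lookup w w2i with
    | some v =>
      have hoov : pvOov w2i (p ++ [w]) = pvOov w2i p := by
        apply pv_oov_snoc_vocab; simp [hlk]
      have := ih (p ++ [w]) (out0 ++ [v]) d (by rw [hoov]; exact hsize)
        (by intro w'; rw [hoov]; exact hget w')
      simp only [List.foldl_cons, hlk]
      rw [this, hassoc]
      simp [pvB, hlk]
    | none =>
      have hnone : (List.lookup w w2i).isNone = true := by simp [hlk]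
      by_cases hc : d.contains w = true
      · -- already-seen OOV word
        have hm : w ∈ pvOov w2i p := by
          rw [PySem.Dict.contains_eq_isSome_get?, hget w] at hc
          exact (pv_lookup_mkTbl_isSome vs _ 0 w).mp hc
        have hoov : pvOov w2i (p ++ [w]) = pvOov w2i p := pv_oov_snoc_old w2i p w hnone hm
        have hstep := ih (p ++ [w]) (out0 ++ [(d.get? w).getD 0]) d
          (by rw [hoov]; exact hsize) (by intro w'; rw [hoov]; exact hget w')
        simp only [List.foldl_cons, hlk, hc, if_true]
        rw [hstep, hassoc]
        have hval : pvB w2i (pvMkTbl vs (pvOov w2i ((p ++ [w]) ++ rest')) 0) w = (d.get? w).getD 0 := by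
          simp only [pvB, hlk]
          rw [pv_lookup_tbl_prefix w2i vs (p ++ [w]) rest' w (by rw [hoov]; exact hm), hoov, hget w]
        simp only [List.map_cons, hval]
        simp
      · -- fresh OOV word
        have hc' : d.contains w = false := by simpa using hc
        have hnm : w ∉ pvOov w2i p := by
          intro hm
          rw [PySem.Dict.contains_eq_isSome_get?, hget w] at hc'
          rw [(pv_lookup_mkTbl_isSome vs _ 0 w).mpr hm] at hc'
          simp at hc'
        have hoov : pvOov w2i (p ++ [w]) = pvOov w2i p ++ [w] := pv_oov_snoc_new w2i p w hnone hnm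
        have hdnone : d.get? w = none := by
          rw [PySem.Dict.contains_eq_isSome_get?] at hc'
          cases h : d.get? w with
          | none => rfl
          | some v => rw [h] at hc'; simp at hc'
        set d' := d.insert w (vs + (d.size : Int)) with hd'
        have htbl' : pvMkTbl vs (pvOov w2i (p ++ [w])) 0
            = pvMkTbl vs (pvOov w2i p) 0 ++ [(w, vs + ((pvOov w2i p).length : Int))] := by
          rw [hoov, pv_mkTbl_append]
          simp [pvMkTbl]
        have hget' : ∀ w', d'.get? w' = List.lookup w' (pvMkTbl vs (pvOov w2i (p ++ [w])) 0) := by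
          intro w'
          rw [htbl', pv_lookup_append, hd', PySem.Dict.get?_insert]
          by_cases he : w' = w
          · subst he
            have hln : List.lookup w' (pvMkTbl vs (pvOov w2i p) 0) = none := by
              rw [← hget w']; exact hdnone
            rw [if_pos rfl, hln]
            simp [Option.or, List.lookup, hsize]
          · have hb : (w' == w) = false := by simp [he]
            rw [if_neg he, hget w']
            cases h : List.lookup w' (pvMkTbl vs (pvOov w2i p) 0) with
            | none => simp [Option.or, List.lookup, hb]
            | some v => simp [Option.or]
        have hsize' : d'.size = (pvOov w2i (p ++ [w])).length := by
          rw [hd', PySem.Dict.size_insert, if_neg (by simp [hc']), hoov]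
          simp [hsize]
        have hstep := ih (p ++ [w]) (out0 ++ [(d'.get? w).getD 0]) d' hsize' hget'
        simp only [List.foldl_cons, hlk, hc', if_neg (by simp : ¬ (false = true))]
        rw [hstep, hassoc]
        have hval : pvB w2i (pvMkTbl vs (pvOov w2i ((p ++ [w]) ++ rest')) 0) w = (d'.get? w).getD 0 := by
          simp only [pvB, hlk]
          rw [pv_lookup_tbl_prefix w2i vs (p ++ [w]) rest' w (by rw [hoov]; simp), hget' w]
        simp only [List.map_cons, hval]
        simp

-- ===== VERDICT (by name: the statement is the Claim_ definition above) =====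
theorem word_list_to_idx_list_spec : Claim_equal_word_list_to_idx_list := by
  intro wl w2i vs _
  unfold Spec_word_list_to_idx_list
  rw [pv_alt_eq, word_list_to_idx_list]
  have := pv_main w2i vs wl [] [] PySem.Dict.empty (by simp [pvOov, PySem.Dict.size_empty])
    (by intro w; simp [pvOov, pvMkTbl, PySem.Dict.get?_empty])
  simpa using this
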